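-- pv_equiv track=rewrite | github.com/SRHgroup/pre_mupexi_variant_calling | research/vcf_samecopy_stats_with_rna.py | choose_tumor_col
-- ===== SOURCE A (Python) =====
-- from typing import Dict, Iterable, List, Optional, Tuple
--
-- def choose_tumor_col(header_samples: List[str], preferred_tumor_label: str) -> int:
--     if not header_samples:
--         return 9
--     # Exact preferred first
--     for i, s in enumerate(header_samples):
--         if s == preferred_tumor_label:
--             return 9 + i
--     # Common fallback names
--     for i, s in enumerate(header_samples):
--         u = s.upper()
--         if u == "TUMOR" or u == "TUMOUR":
--             return 9 + i
--     # Name contains tumor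
--     for i, s in enumerate(header_samples):
--         u = s.upper()
--         if "TUMOR" in u or "TUMOUR" in u:
--             return 9 + i
--     # Two-sample fallback: non-normal
--     if len(header_samples) == 2:
--         a, b = header_samples[0], header_samples[1]
--         au, bu = a.upper(), b.upper()
--         a_norm = "NORMAL" in au or au.endswith("_N")
--         b_norm = "NORMAL" in bu or bu.endswith("_N")
--         if a_norm and not b_norm:
--             return 10
--         if b_norm and not a_norm:
--             return 9
--     return 9
-- ===== SOURCE B (Python) =====
-- def choose_tumor_col(header_samples, preferred_tumor_label):
--     if not header_samples:
--         return 9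
--     best = None  # (rank, first index with that rank)
--     for i, s in enumerate(header_samples):
--         u = s.upper()
--         if s == preferred_tumor_label:
--             r = 0
--         elif u == "TUMOR" or u == "TUMOUR":
--             r = 1
--         elif "TUMOR" in u or "TUMOUR" in u:
--             r = 2
--         else:
--             continue
--         if best is None or r < best[0]:
--             best = (r, i)
--     if best is not None:
--         return 9 + best[1]
--     if len(header_samples) == 2:
--         a, b = header_samples
--         au, bu = a.upper(), b.upper()
--         a_norm = "NORMAL" in au or au.endswith("_N")
--         b_norm = "NORMAL" in bu or bu.endswith("_N")
--         if a_norm and not b_norm: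
--             return 10
--         if b_norm and not a_norm:
--             return 9
--     return 9
-- ===== Notes on version B (the rewrite author's own statement) =====
-- stated objective: alternative
-- what changed: Replaces A's three sequential scans of the header with a single pass that assigns each sample a priority rank (0 exact preferred, 1 exact TUMOR/TUMOUR, 2 substring match) and keeps the lowest rank with its first index.
import Mathlib
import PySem

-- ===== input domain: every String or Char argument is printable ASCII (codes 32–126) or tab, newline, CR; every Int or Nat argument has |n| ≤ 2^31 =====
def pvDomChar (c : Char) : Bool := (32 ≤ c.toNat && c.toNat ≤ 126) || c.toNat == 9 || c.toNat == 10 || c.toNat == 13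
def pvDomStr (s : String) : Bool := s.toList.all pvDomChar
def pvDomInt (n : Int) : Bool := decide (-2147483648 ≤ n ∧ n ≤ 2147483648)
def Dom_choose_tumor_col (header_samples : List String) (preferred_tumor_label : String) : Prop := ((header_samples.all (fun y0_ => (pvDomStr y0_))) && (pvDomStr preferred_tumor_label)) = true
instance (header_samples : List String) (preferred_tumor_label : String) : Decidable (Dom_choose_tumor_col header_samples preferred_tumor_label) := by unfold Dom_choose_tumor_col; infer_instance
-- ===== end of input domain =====

-- B replaces A's three sequential priority scans by one pass tracking the minimum
-- priority rank with its first index (objective: alternative decomposition, same cost).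

-- ===== PORT A =====
-- one 'for i, s in enumerate(...)' loop with an early return on predicate p
def pvScanA (p : String → Bool) : List String → Nat → Option Nat
  | [], _ => none
  | s :: rest, i => if p s then some i else pvScanA p rest (i + 1)

-- the trailing two-sample fallback of A
def pvFallbackA (hs : List String) : Int :=
  if hs.length = 2 then
    match hs with
    | a :: b :: _ =>
      let au := PySem.Str.upper a
      let bu := PySem.Str.upper b
      let a_norm := PySem.Str.isIn "NORMAL" au || PySem.Str.endswith au "_N"
      let b_norm := PySem.Str.isIn "NORMAL" bu || PySem.Str.endswith bu "_N"
      if a_norm && !b_norm then 10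
      else if b_norm && !a_norm then 9
      else 9
    | _ => 9
  else 9

def choose_tumor_col (header_samples : List String) (preferred_tumor_label : String) : Int :=
  if header_samples = [] then 9
  else
    match pvScanA (fun s => s == preferred_tumor_label) header_samples 0 with
    | some i => 9 + (i : Int)
    | none =>
      match pvScanA (fun s => PySem.Str.upper s == "TUMOR" || PySem.Str.upper s == "TUMOUR") header_samples 0 with
      | some i => 9 + (i : Int)
      | none =>
        match pvScanA (fun s => PySem.Str.isIn "TUMOR" (PySem.Str.upper s) || PySem.Str.isIn "TUMOUR" (PySem.Str.upper s)) header_samples 0 with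
        | some i => 9 + (i : Int)
        | none => pvFallbackA header_samples

-- ===== PORT B =====
-- priority rank of one sample: 0 exact preferred, 1 exact TUMOR/TUMOUR, 2 substring, none otherwise
def pvRank (pref s : String) : Option Nat :=
  let u := PySem.Str.upper s
  if s == pref then some 0
  else if u == "TUMOR" || u == "TUMOUR" then some 1
  else if PySem.Str.isIn "TUMOR" u || PySem.Str.isIn "TUMOUR" u then some 2
  else none

-- the single pass: keep the best (lowest) rank with its first index
def pvBest (pref : String) : List String → Nat → Option (Nat × Nat) → Option (Nat × Nat)
  | [], _, best => best
  | s :: rest, i, best =>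
    let best' :=
      match pvRank pref s with
      | none => best
      | some r =>
        match best with
        | none => some (r, i)
        | some (br, bi) => if r < br then some (r, i) else some (br, bi)
    pvBest pref rest (i + 1) best'

-- the trailing two-sample fallback of B (same code as in Source B)
def pvFallbackB (hs : List String) : Int :=
  if hs.length = 2 then
    match hs with
    | a :: b :: _ =>
      let au := PySem.Str.upper a
      let bu := PySem.Str.upper b
      let a_norm := PySem.Str.isIn "NORMAL" au || PySem.Str.endswith au "_N"
      let b_norm := PySem.Str.isIn "NORMAL" bu || PySem.Str.endswith bu "_N"
      if a_norm && !b_norm then 10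
      else if b_norm && !a_norm then 9
      else 9
    | _ => 9
  else 9

def choose_tumor_col_alt (header_samples : List String) (preferred_tumor_label : String) : Int :=
  if header_samples = [] then 9
  else
    match pvBest preferred_tumor_label header_samples 0 none with
    | some (_, i) => 9 + (i : Int)
    | none => pvFallbackB header_samples

-- ===== PRECONDITION & SPEC =====
def Spec_choose_tumor_col (header_samples : List String) (preferred_tumor_label : String) (out : Int) : Prop := out = choose_tumor_col_alt header_samples preferred_tumor_label
instance (header_samples : List String) (preferred_tumor_label : String) (out : Int) : Decidable (Spec_choose_tumor_col header_samples preferred_tumor_label out) := by unfold Spec_choose_tumor_col; infer_instance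

-- ===== CLAIM (what is proved, stated in full; the proofs are below) =====
def Claim_equal_choose_tumor_col : Prop := ∀ (header_samples : List String) (preferred_tumor_label : String), Dom_choose_tumor_col header_samples preferred_tumor_label → Spec_choose_tumor_col header_samples preferred_tumor_label (choose_tumor_col header_samples preferred_tumor_label)

-- ===== LEMMAS AND PROOFS =====

theorem pvBest_rank0 (pref : String) (l : List String) (i k : Nat) :
    pvBest pref l i (some (0, k)) = some (0, k) := by
  induction l generalizing i with
  | nil => rfl
  | cons s rest ih =>
    simp only [pvBest]
    cases h : pvRank pref s with
    | none => exact ih (i + 1)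
    | some r => simp only [Nat.not_lt_zero, if_false]; exact ih (i + 1)

theorem pvRank_of_ne (pref s : String) (h : (s == pref) = false) :
    pvRank pref s = none ∨ ∃ r, pvRank pref s = some r ∧ 1 ≤ r := by
  unfold pvRank
  simp only [h, Bool.false_eq_true, if_false]
  split
  · exact Or.inr ⟨1, rfl, le_refl 1⟩
  · split
    · exact Or.inr ⟨2, rfl, by omega⟩
    · exact Or.inl rfl

theorem pvBest_rank1 (pref : String) (l : List String) (i k : Nat) :
    pvBest pref l i (some (1, k)) =
      match pvScanA (fun s => s == pref) l i with
      | some j => some (0, j)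
      | none => some (1, k) := by
  induction l generalizing i with
  | nil => rfl
  | cons s rest ih =>
    by_cases hp : (s == pref) = true
    · simp only [pvBest, pvScanA, hp, if_true]
      unfold pvRank
      simp only [hp, if_true]
      simpa using pvBest_rank0 pref rest (i + 1) i
    · have hp' : (s == pref) = false := by simpa using hp
      simp only [pvBest, pvScanA, hp', Bool.false_eq_true, if_false]
      rcases pvRank_of_ne pref s hp' with h | ⟨r, hr, h1⟩
      · simp only [h]; exact ih (i + 1)
      · simp only [hr]
        have : ¬ r < 1 := by omega
        simp only [this, if_false]
        exact ih (i + 1)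

theorem pvBest_rank2 (pref : String) (l : List String) (i k : Nat) :
    pvBest pref l i (some (2, k)) =
      match pvScanA (fun s => s == pref) l i with
      | some j => some (0, j)
      | none =>
        match pvScanA (fun s => PySem.Str.upper s == "TUMOR" || PySem.Str.upper s == "TUMOUR") l i with
        | some j => some (1, j)
        | none => some (2, k) := by
  induction l generalizing i with
  | nil => rfl
  | cons s rest ih =>
    by_cases hp : (s == pref) = true
    · simp only [pvBest, pvScanA, hp, if_true]
      unfold pvRank
      simp only [hp, if_true]
      simpa using pvBest_rank0 pref rest (i + 1) i
    · have hp' : (s == pref) = false := by simpa using hp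
      by_cases h1 : (PySem.Str.upper s == "TUMOR" || PySem.Str.upper s == "TUMOUR") = true
      · simp only [pvBest, pvScanA, hp', Bool.false_eq_true, if_false, h1, if_true]
        unfold pvRank
        simp only [hp', Bool.false_eq_true, if_false, h1, if_true]
        have := pvBest_rank1 pref rest (i + 1) i
        simpa using this
      · have h1' : (PySem.Str.upper s == "TUMOR" || PySem.Str.upper s == "TUMOUR") = false := by
          simpa using h1
        simp only [pvBest, pvScanA, hp', Bool.false_eq_true, if_false, h1', if_false]
        have hrank : pvRank pref s = none ∨ pvRank pref s = some 2 := by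
          unfold pvRank
          simp only [hp', Bool.false_eq_true, if_false, h1', if_false]
          split
          · exact Or.inr rfl
          · exact Or.inl rfl
        rcases hrank with h | h <;> simp only [h]
        · exact ih (i + 1)
        · simp only [Nat.lt_irrefl, if_false]
          exact ih (i + 1)

theorem pvBest_none (pref : String) (l : List String) (i : Nat) :
    pvBest pref l i none =
      match pvScanA (fun s => s == pref) l i with
      | some j => some (0, j)
      | none =>
        match pvScanA (fun s => PySem.Str.upper s == "TUMOR" || PySem.Str.upper s == "TUMOUR") l i with
        | some j => some (1, j)
        | none =>
          match pvScanA (fun s => PySem.Str.isIn "TUMOR" (PySem.Str.upper s) || PySem.Str.isIn "TUMOUR" (PySem.Str.upper s)) l i with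
          | some j => some (2, j)
          | none => none := by
  induction l generalizing i with
  | nil => rfl
  | cons s rest ih =>
    by_cases hp : (s == pref) = true
    · simp only [pvBest, pvScanA, hp, if_true]
      unfold pvRank
      simp only [hp, if_true]
      simpa using pvBest_rank0 pref rest (i + 1) i
    · have hp' : (s == pref) = false := by simpa using hp
      by_cases h1 : (PySem.Str.upper s == "TUMOR" || PySem.Str.upper s == "TUMOUR") = true
      · simp only [pvBest, pvScanA, hp', Bool.false_eq_true, if_false, h1, if_true]
        unfold pvRank
        simp only [hp', Bool.false_eq_true, if_false, h1, if_true]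
        simpa using pvBest_rank1 pref rest (i + 1) i
      · have h1' : (PySem.Str.upper s == "TUMOR" || PySem.Str.upper s == "TUMOUR") = false := by
          simpa using h1
        by_cases h2 : (PySem.Str.isIn "TUMOR" (PySem.Str.upper s) || PySem.Str.isIn "TUMOUR" (PySem.Str.upper s)) = true
        · simp only [pvBest, pvScanA, hp', Bool.false_eq_true, if_false, h1', h2, if_true]
          unfold pvRank
          simp only [hp', Bool.false_eq_true, if_false, h1', h2, if_true]
          simpa using pvBest_rank2 pref rest (i + 1) i
        · have h2' : (PySem.Str.isIn "TUMOR" (PySem.Str.upper s) || PySem.Str.isIn "TUMOUR" (PySem.Str.upper s)) = false := by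
            simpa using h2
          have hrank : pvRank pref s = none := by
            unfold pvRank
            simp only [hp', Bool.false_eq_true, if_false, h1', h2', if_false]
          simp only [pvBest, pvScanA, hp', Bool.false_eq_true, if_false, h1', h2', hrank]
          exact ih (i + 1)

theorem pvFallback_eq (hs : List String) : pvFallbackA hs = pvFallbackB hs := rfl

-- ===== VERDICT (by name: the statement is the Claim_ definition above) =====
theorem choose_tumor_col_spec : Claim_equal_choose_tumor_col := by
  intro hs pref _
  unfold Spec_choose_tumor_col choose_tumor_col choose_tumor_col_alt
  by_cases h : hs = []
  · simp [h]
  · simp only [h, if_false]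
    rw [pvBest_none]
    cases pvScanA (fun s => s == pref) hs 0 with
    | some j => rfl
    | none =>
      cases pvScanA (fun s => PySem.Str.upper s == "TUMOR" || PySem.Str.upper s == "TUMOUR") hs 0 with
      | some j => rfl
      | none =>
        cases pvScanA (fun s => PySem.Str.isIn "TUMOR" (PySem.Str.upper s) || PySem.Str.isIn "TUMOUR" (PySem.Str.upper s)) hs 0 with
        | some j => rfl
        | none => exact pvFallback_eq hs
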